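-- pv_equiv track=rewrite | github.com/larkinandy/ChildrensHealthSocialMediaASP3IRE | database_setup/db_package/TweetIngestClass.py | reformatReferences
-- ===== SOURCE A (Python) =====
-- def reformatReferences(tweetBatch):
--
--     # initialize defaults for when no references for a particular type are available
--     replySets,quoteSets,retweetSets = [],[],[]
--
--     # for references of each tweet record, extract refernces and add to an array for the
--     # entire tweet batch
--     for tweet in tweetBatch:
--         if('reply' in tweet['referenceDict'].keys()):
--             replySets += tweet['referenceDict']['reply']
--         if('quoted_tweet' in tweet['referenceDict'].keys()):
--             quoteSets += tweet['referenceDict']['quoted_tweet']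
--         if('retweet' in tweet['referenceDict'].keys()):
--             retweetSets += tweet['referenceDict']['retweet']
--
--     # create a dict representing references for the entire tweet batch
--     return({
--         'replies':replySets,
--         'quotes':quoteSets,
--         'retweets':retweetSets
--     })
-- ===== SOURCE B (Python) =====
-- def reformatReferences(tweetBatch):
--     # Three independent flattening passes, one per reference kind.
--     replies = [r for tweet in tweetBatch for r in tweet['referenceDict'].get('reply', [])]
--     quotes = [r for tweet in tweetBatch for r in tweet['referenceDict'].get('quoted_tweet', [])]
--     retweets = [r for tweet in tweetBatch for r in tweet['referenceDict'].get('retweet', [])]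
--     return {'replies': replies, 'quotes': quotes, 'retweets': retweets}
-- ===== Notes on version B (the rewrite author's own statement) =====
-- stated objective: alternative
-- what changed: Replaced the single interleaved loop maintaining three accumulators with three independent flattening comprehensions, one per reference kind, using .get(key, []) instead of a membership test plus indexing.
import Mathlib
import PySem

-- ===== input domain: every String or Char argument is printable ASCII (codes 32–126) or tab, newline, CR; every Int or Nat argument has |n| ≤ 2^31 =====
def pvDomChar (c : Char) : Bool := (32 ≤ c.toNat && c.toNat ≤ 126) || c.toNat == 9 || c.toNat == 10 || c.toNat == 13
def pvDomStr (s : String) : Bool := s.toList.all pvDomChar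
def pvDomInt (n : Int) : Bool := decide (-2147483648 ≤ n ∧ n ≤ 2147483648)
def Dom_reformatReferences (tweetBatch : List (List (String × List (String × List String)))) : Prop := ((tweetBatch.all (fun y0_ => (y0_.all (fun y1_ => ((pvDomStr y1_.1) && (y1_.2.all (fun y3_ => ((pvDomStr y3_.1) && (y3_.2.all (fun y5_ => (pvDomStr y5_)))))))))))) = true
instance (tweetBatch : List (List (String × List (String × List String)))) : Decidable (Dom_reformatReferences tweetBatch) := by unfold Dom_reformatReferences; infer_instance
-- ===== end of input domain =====

-- B replaces A's single interleaved pass with three accumulators by three independent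
-- flattening passes, one per reference kind (objective: alternative decomposition).

-- ===== PORT A =====
-- tweet['referenceDict'] : dicts are association lists; getD [] is only reached
-- outside Pre_ (Python raises KeyError there).
def pvRefDict (tweet : List (String × List (String × List String))) :
    PySem.Dict String (List String) :=
  PySem.Dict.mk (((PySem.Dict.mk tweet).get? "referenceDict").getD [])

def reformatReferences (tweetBatch : List (List (String × List (String × List String)))) : List (String × List String) :=
  let acc := tweetBatch.foldl
    (fun (acc : List String × List String × List String) tweet =>
      let rd := pvRefDict tweet
      let replySets := if rd.contains "reply" then acc.1 ++ rd.getD "reply" [] else acc.1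
      let quoteSets := if rd.contains "quoted_tweet" then acc.2.1 ++ rd.getD "quoted_tweet" [] else acc.2.1
      let retweetSets := if rd.contains "retweet" then acc.2.2 ++ rd.getD "retweet" [] else acc.2.2
      (replySets, quoteSets, retweetSets))
    ([], [], [])
  [("replies", acc.1), ("quotes", acc.2.1), ("retweets", acc.2.2)]

-- ===== PORT B =====
-- one flattening pass per key: tweet['referenceDict'].get(key, [])
def pvGetRefs (key : String) (tweet : List (String × List (String × List String))) : List String :=
  (pvRefDict tweet).getD key []

def reformatReferences_alt (tweetBatch : List (List (String × List (String × List String)))) : List (String × List String) :=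
  [("replies", tweetBatch.flatMap (pvGetRefs "reply")),
   ("quotes", tweetBatch.flatMap (pvGetRefs "quoted_tweet")),
   ("retweets", tweetBatch.flatMap (pvGetRefs "retweet"))]

-- ===== PRECONDITION & SPEC =====
-- Pre_ excludes tweets without a 'referenceDict' key, on which both A and B raise KeyError.
def Pre_reformatReferences (tweetBatch : List (List (String × List (String × List String)))) : Prop :=
  ∀ tweet ∈ tweetBatch, ((PySem.Dict.mk tweet).get? "referenceDict").isSome = true
instance (tweetBatch : List (List (String × List (String × List String)))) : Decidable (Pre_reformatReferences tweetBatch) := by unfold Pre_reformatReferences; infer_instance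
def pvWitness_reformatReferences : (List (List (String × List (String × List String)))) :=
  [[("referenceDict", [("reply", ["1", "2"])])], [("referenceDict", [])]]

def Spec_reformatReferences (tweetBatch : List (List (String × List (String × List String)))) (out : List (String × List String)) : Prop := out = reformatReferences_alt tweetBatch
instance (tweetBatch : List (List (String × List (String × List String)))) (out : List (String × List String)) : Decidable (Spec_reformatReferences tweetBatch out) := by unfold Spec_reformatReferences; infer_instance

-- ===== CLAIM (what is proved, stated in full; the proofs are below) =====
def Claim_equal_reformatReferences : Prop := ∀ (tweetBatch : List (List (String × List (String × List String)))), Dom_reformatReferences tweetBatch → Pre_reformatReferences tweetBatch → Spec_reformatReferences tweetBatch (reformatReferences tweetBatch)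

-- ===== LEMMAS AND PROOFS =====

-- each branch of A's step appends getD key []: when the key is absent getD is [] and ++ [] is a no-op
theorem pv_step_branch (rd : PySem.Dict String (List String)) (k : String) (acc : List String) :
    (if rd.contains k then acc ++ rd.getD k [] else acc) = acc ++ rd.getD k [] := by
  by_cases h : rd.contains k = true
  · simp [h]
  · have hc : rd.contains k = false := by simpa using h
    simp [h, PySem.Dict.getD_of_not_contains (h := hc)]

-- A's step function with the if-branches collapsed
theorem pv_step_eq :
    (fun (acc : List String × List String × List String) tweet =>
      let rd := pvRefDict tweet
      (if rd.contains "reply" then acc.1 ++ rd.getD "reply" [] else acc.1,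
       if rd.contains "quoted_tweet" then acc.2.1 ++ rd.getD "quoted_tweet" [] else acc.2.1,
       if rd.contains "retweet" then acc.2.2 ++ rd.getD "retweet" [] else acc.2.2))
    = (fun (acc : List String × List String × List String) tweet =>
        (acc.1 ++ pvGetRefs "reply" tweet,
         acc.2.1 ++ pvGetRefs "quoted_tweet" tweet,
         acc.2.2 ++ pvGetRefs "retweet" tweet)) := by
  funext acc tweet
  simp only [pv_step_branch, pvGetRefs]

-- A's fold, from any accumulator, appends the three flatMaps
theorem pv_fold_eq (tb : List (List (String × List (String × List String))))
    (r q t : List String) :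
    tb.foldl
      (fun (acc : List String × List String × List String) tweet =>
        (acc.1 ++ pvGetRefs "reply" tweet,
         acc.2.1 ++ pvGetRefs "quoted_tweet" tweet,
         acc.2.2 ++ pvGetRefs "retweet" tweet))
      (r, q, t)
    = (r ++ tb.flatMap (pvGetRefs "reply"),
       q ++ tb.flatMap (pvGetRefs "quoted_tweet"),
       t ++ tb.flatMap (pvGetRefs "retweet")) := by
  induction tb generalizing r q t with
  | nil => simp
  | cons hd tl ih =>
      simp only [List.foldl_cons, List.flatMap_cons]
      rw [ih]
      simp [List.append_assoc]

-- ===== VERDICT (by name: the statement is the Claim_ definition above) =====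
theorem reformatReferences_spec : Claim_equal_reformatReferences := by
  intro tb _ _
  show reformatReferences tb = reformatReferences_alt tb
  simp only [reformatReferences, reformatReferences_alt, pv_step_eq, pv_fold_eq,
    List.nil_append]
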